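-- pv_equiv track=rewrite | github.com/jain-sasuke/hydrogen-qss-breakdown | src/parsers/parse_ccc.py | decode_filename
-- ===== SOURCE A (Python) =====
-- def decode_filename(filename):
--     """
--     Decode CCC filename to quantum numbers.
--
--     Bray's notation:
--     - S, P, D, F, G, H, I, J, K, L = l = 0, 1, 2, 3, 4, 5, 6, 7, 8, 9
--     - : = n = 10
--     - Numbers 1-9 = n = 1-9
--
--     Examples:
--         '1S.2P' -> (n=1, l=0) -> (n=2, l=1)
--         '2P.3D' -> (n=2, l=1) -> (n=3, l=2)
--         ':P.1'  -> (n=10, l=1) -> ionization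
--
--     Args:
--         filename: CCC filename (e.g., '1S.2P')
--
--     Returns:
--         ni, li, nf, lf: Initial and final quantum numbers
--         or None if parsing fails
--     """
--
--     l_map = {
--         'S': 0, 'P': 1, 'D': 2, 'F': 3, 'G': 4,
--         'H': 5, 'I': 6, 'J': 7, 'K': 8, 'L': 9
--     }
--
--     parts = filename.split('.')
--     if len(parts) != 2:
--         return None, None, None, None
--
--     initial, final = parts
--
--     # Parse initial state
--     if initial.startswith(':'):
--         ni = 10
--         l_letter = initial[1:]
--         if l_letter in l_map:
--             li = l_map[l_letter]
--         else:
--             return None, None, None, None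
--     else:
--         digit_part = ''
--         l_letter = ''
--         for char in initial:
--             if char.isdigit():
--                 digit_part += char
--             else:
--                 l_letter = char
--                 break
--
--         if digit_part and l_letter in l_map:
--             ni = int(digit_part)
--             li = l_map[l_letter]
--         else:
--             return None, None, None, None
--
--     # Parse final state
--     if final.startswith(':'):
--         nf = 10
--         l_letter = final[1:]
--         if l_letter in l_map:
--             lf = l_map[l_letter]
--         else:
--             return None, None, None, None
--     else:
--         digit_part = ''
--         l_letter = ''
--         for char in final:
--             if char.isdigit():
--                 digit_part += char
--             else:
--                 l_letter = char
--                 break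
--
--         if digit_part:
--             nf = int(digit_part)
--             if l_letter in l_map:
--                 lf = l_map[l_letter]
--             else:
--                 lf = -1  # Continuum
--         else:
--             return None, None, None, None
--
--     return ni, li, nf, lf
-- ===== SOURCE B (Python) =====
-- _L = {'S': 0, 'P': 1, 'D': 2, 'F': 3, 'G': 4,
--       'H': 5, 'I': 6, 'J': 7, 'K': 8, 'L': 9}
--
-- _FAIL = (None, None, None, None)
--
--
-- def decode_filename(filename):
--     """Single left-to-right pass: a small state machine consumes the whole
--     filename character by character (no split, no slicing, no re-scan);
--     every malformed input takes the same early exit, which is exact because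
--     the original returns the same 4-None tuple on every failure."""
--     pairs = []            # finished (n, l) states, at most 2
--     mode = 'begin'        # begin | colon | colonletter | digits | tail
--     ds = ''               # accumulated digit run of the current state
--     l = -1
--     for c in filename:
--         if c == '.':
--             if len(pairs) == 1:
--                 return _FAIL          # a third dot-separated part
--             if mode == 'colonletter':
--                 pairs.append((10, l))
--             elif mode in ('digits', 'tail') and l >= 0:
--                 pairs.append((int(ds), l))  # initial state needs a known letter
--             else:
--                 return _FAIL
--             mode, ds, l = 'begin', '', -1
--         elif mode == 'begin':
--             if c == ':':
--                 mode = 'colon'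
--             elif c.isdigit():
--                 mode, ds = 'digits', ds + c
--             else:
--                 return _FAIL          # letter before any digit
--         elif mode == 'colon':
--             if c in _L:
--                 mode, l = 'colonletter', _L[c]
--             else:
--                 return _FAIL
--         elif mode == 'colonletter':
--             return _FAIL              # more than one char after ':'
--         elif mode == 'digits':
--             if c.isdigit():
--                 ds += c
--             else:
--                 mode, l = 'tail', _L.get(c, -1)
--         # mode == 'tail': junk after the letter is ignored
--     if len(pairs) != 1:
--         return _FAIL                  # no dot at all (or empty input)
--     if mode == 'colonletter':
--         pairs.append((10, l))
--     elif mode in ('digits', 'tail'):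
--         pairs.append((int(ds), l))    # final state: l may be -1 (continuum)
--     else:
--         return _FAIL
--     return pairs[0][0], pairs[0][1], pairs[1][0], pairs[1][1]
-- ===== Notes on version B (the rewrite author's own statement) =====
-- stated objective: alternative
-- what changed: A's split('.') plus two duplicated accumulate-and-break per-part parsers are replaced by one single left-to-right pass: a five-state character machine that consumes the whole filename at once (no split, no slicing, no per-part re-scan) and finalizes a (n,l) pair at each dot and at end of string.
import Mathlib
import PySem

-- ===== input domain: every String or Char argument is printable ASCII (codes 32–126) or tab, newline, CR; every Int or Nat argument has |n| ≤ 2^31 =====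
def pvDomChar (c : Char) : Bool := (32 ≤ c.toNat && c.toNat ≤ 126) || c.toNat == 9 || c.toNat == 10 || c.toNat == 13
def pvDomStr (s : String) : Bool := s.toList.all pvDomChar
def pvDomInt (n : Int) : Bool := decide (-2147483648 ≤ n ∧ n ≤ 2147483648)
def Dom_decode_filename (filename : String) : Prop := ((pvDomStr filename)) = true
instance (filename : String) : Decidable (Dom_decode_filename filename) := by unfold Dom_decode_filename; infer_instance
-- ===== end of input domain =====

-- B replaces A's split('.') + two duplicated accumulate-and-break per-part parsers by ONE
-- left-to-right pass: a five-state character machine over the whole filename (no split, no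
-- slicing, no per-part re-scan); objective: alternative single-pass algorithm, no speed claim.

-- ===== PORT A =====

-- the dict literal l_map (keys are strings, here lists of code points)
def A_lmap : PySem.Dict (List Char) Int :=
  ⟨[(['S'],0),(['P'],1),(['D'],2),(['F'],3),(['G'],4),
    (['H'],5),(['I'],6),(['J'],7),(['K'],8),(['L'],9)]⟩

-- 'for char in state: if char.isdigit(): digit_part += char else: l_letter = char; break'
def A_scan : List Char → List Char → List Char × List Char
  | [], dp => (dp, [])                 -- loop ends, l_letter still ''
  | c :: rest, dp =>
      if PySem.Chars.isdigit c then A_scan rest (dp ++ [c]) else (dp, [c])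

-- the '# Parse initial state' block; some (ni, li) / none for the early 'return None,...'
def A_parseInitial (s : List Char) : Option (Int × Int) :=
  if PySem.Chars.startswith s [':'] then
    match A_lmap.get? (s.drop 1) with  -- initial[1:] in l_map
    | some li => some (10, li)
    | none => none
  else
    match A_scan s [] with
    | (dp, ll) =>
      if dp ≠ [] then
        match A_lmap.get? ll with
        | some li => some ((PySem.Int.ofChars? dp).getD 0, li)  -- int(digit_part); dp is a nonempty ASCII digit run, never none
        | none => none
      else none

-- the '# Parse final state' block
def A_parseFinal (s : List Char) : Option (Int × Int) :=
  if PySem.Chars.startswith s [':'] then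
    match A_lmap.get? (s.drop 1) with
    | some lf => some (10, lf)
    | none => none
  else
    match A_scan s [] with
    | (dp, ll) =>
      if dp ≠ [] then
        some ((PySem.Int.ofChars? dp).getD 0,
              match A_lmap.get? ll with
              | some lf => lf
              | none => -1)            -- Continuum
      else none

def decode_filename (filename : String) : Option Int × Option Int × Option Int × Option Int :=
  let parts := (PySem.Str.split? filename ".").getD []  -- sep '.' ≠ '', split never raises
  match parts with
  | [initial, final] =>                -- len(parts) == 2; 'initial, final = parts'
      match A_parseInitial initial.toList with
      | none => (none, none, none, none)
      | some (ni, li) =>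
        match A_parseFinal final.toList with
        | none => (none, none, none, none)
        | some (nf, lf) => (some ni, some li, some nf, some lf)
  | _ => (none, none, none, none)

-- ===== PORT B =====

-- the dict literal _L (single-character keys, so keyed by Char)
def B_lmap : PySem.Dict Char Int :=
  ⟨[('S',0),('P',1),('D',2),('F',3),('G',4),
    ('H',5),('I',6),('J',7),('K',8),('L',9)]⟩

-- _FAIL = (None, None, None, None)
def B_FAIL : Option Int × Option Int × Option Int × Option Int := (none, none, none, none)

-- mode = 'begin' | 'colon' | 'colonletter' | 'digits' | 'tail'
inductive BMode : Type
  | bg | colon | colonletter | digits | tail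
deriving DecidableEq, Repr

-- one iteration of B's 'for c in filename' body; none = the early 'return _FAIL'
-- (state = (mode, ds, l, pairs))
def B_step (s : BMode × List Char × Int × List (Int × Int)) (c : Char) :
    Option (BMode × List Char × Int × List (Int × Int)) :=
  let m := s.1
  let ds := s.2.1
  let l := s.2.2.1
  let pairs := s.2.2.2
  (if c = '.' then
      if pairs.length = 1 then none            -- a third dot-separated part
      else
        match m with
        | .colonletter => some (.bg, [], -1, pairs ++ [((10 : Int), l)])
        | .digits => if 0 ≤ l then some (.bg, [], -1, pairs ++ [((PySem.Int.ofChars? ds).getD 0, l)]) else none  -- int(ds); ds a nonempty ASCII digit run, never none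
        | .tail => if 0 ≤ l then some (.bg, [], -1, pairs ++ [((PySem.Int.ofChars? ds).getD 0, l)]) else none
        | _ => none
    else
      match m with
      | .bg =>
          if c = ':' then some (.colon, ds, l, pairs)
          else if PySem.Chars.isdigit c then some (.digits, ds ++ [c], l, pairs)
          else none
      | .colon =>
          match B_lmap.get? c with              -- 'c in _L' / '_L[c]'
          | some lv => some (.colonletter, ds, lv, pairs)
          | none => none
      | .colonletter => none
      | .digits =>
          if PySem.Chars.isdigit c then some (.digits, ds ++ [c], l, pairs)
          else some (.tail, ds, B_lmap.getD c (-1), pairs)  -- _L.get(c, -1)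
      | .tail => some (.tail, ds, l, pairs))

def decode_filename_alt (filename : String) : Option Int × Option Int × Option Int × Option Int :=
  match filename.toList.foldl (fun st c => st.bind (fun s => B_step s c)) (some (.bg, [], -1, [])) with
  | some (m, ds, l, pairs) =>
    if pairs.length ≠ 1 then B_FAIL             -- 'if len(pairs) != 1: return _FAIL'
    else
      let p1 := pairs.headI                     -- pairs[0] (pairs has exactly one element here)
      match m with                              -- finalize the final state at end of string
      | .colonletter => (some p1.1, some p1.2, some 10, some l)
      | .digits => (some p1.1, some p1.2, some ((PySem.Int.ofChars? ds).getD 0), some l)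
      | .tail => (some p1.1, some p1.2, some ((PySem.Int.ofChars? ds).getD 0), some l)
      | _ => B_FAIL
  | none => B_FAIL

-- ===== PRECONDITION & SPEC =====
def Spec_decode_filename (filename : String) (out : Option Int × Option Int × Option Int × Option Int) : Prop := out = decode_filename_alt filename
instance (filename : String) (out : Option Int × Option Int × Option Int × Option Int) : Decidable (Spec_decode_filename filename out) := by unfold Spec_decode_filename; infer_instance

-- ===== CLAIM (what is proved, stated in full; the proofs are below) =====
def Claim_equal_decode_filename : Prop := ∀ (filename : String), Dom_decode_filename filename → Spec_decode_filename filename (decode_filename filename)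

-- ===== LEMMAS AND PROOFS =====

-- proof-side view of B's loop body on a non-dot character: the pairs component is untouched
def tokStep : BMode × List Char × Int → Char → Option (BMode × List Char × Int)
  | (m, ds, l), c =>
    match m with
    | .bg =>
        if c = ':' then some (.colon, ds, l)
        else if PySem.Chars.isdigit c then some (.digits, ds ++ [c], l)
        else none
    | .colon =>
        match B_lmap.get? c with
        | some lv => some (.colonletter, ds, lv)
        | none => none
    | .colonletter => none
    | .digits =>
        if PySem.Chars.isdigit c then some (.digits, ds ++ [c], l)
        else some (.tail, ds, B_lmap.getD c (-1))
    | .tail => some (.tail, ds, l)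

def tokRun (cs : List Char) (st : BMode × List Char × Int) : Option (BMode × List Char × Int) :=
  cs.foldl (fun a c => a.bind (fun s => tokStep s c)) (some st)

-- finalization of the current state at a dot (initial style: needs a known letter) …
def iniSt : BMode × List Char × Int → Option (Int × Int)
  | (.colonletter, _, l) => some (10, l)
  | (.digits, ds, l) => if 0 ≤ l then some ((PySem.Int.ofChars? ds).getD 0, l) else none
  | (.tail, ds, l) => if 0 ≤ l then some ((PySem.Int.ofChars? ds).getD 0, l) else none
  | _ => none

-- … and at end of string (final style: l = -1 is the continuum)
def finSt : BMode × List Char × Int → Option (Int × Int)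
  | (.colonletter, _, l) => some (10, l)
  | (.digits, ds, l) => some ((PySem.Int.ofChars? ds).getD 0, l)
  | (.tail, ds, l) => some ((PySem.Int.ofChars? ds).getD 0, l)
  | _ => none

theorem foldB_none (cs : List Char) :
    cs.foldl (fun st c => st.bind (fun s => B_step s c)) none = none := by
  induction cs with
  | nil => rfl
  | cons c rest ih => simpa using ih

theorem tokRun_none (cs : List Char) :
    cs.foldl (fun a c => a.bind (fun s => tokStep s c)) none = none := by
  induction cs with
  | nil => rfl
  | cons c rest ih => simpa using ih

theorem tokRun_cons (c : Char) (cs : List Char) (st : BMode × List Char × Int) :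
    tokRun (c :: cs) st =
      match tokStep st c with
      | some st' => tokRun cs st'
      | none => none := by
  cases h : tokStep st c with
  | none => simp [tokRun, h, tokRun_none]
  | some st' => simp [tokRun, h]

theorem B_step_nondot (c : Char) (hc : c ≠ '.') (m : BMode) (ds : List Char) (l : Int)
    (p : List (Int × Int)) :
    B_step (m, ds, l, p) c = (tokStep (m, ds, l) c).map (fun s => (s.1, s.2.1, s.2.2, p)) := by
  cases m <;> simp [B_step, tokStep, hc] <;>
    first
      | (cases B_lmap.get? c <;> simp)
      | (split_ifs <;> simp)

theorem foldB_nodot (cs : List Char) (h : '.' ∉ cs) (m : BMode) (ds : List Char) (l : Int)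
    (p : List (Int × Int)) :
    cs.foldl (fun st c => st.bind (fun s => B_step s c)) (some (m, ds, l, p)) =
      (tokRun cs (m, ds, l)).map (fun s => (s.1, s.2.1, s.2.2, p)) := by
  induction cs generalizing m ds l with
  | nil => rfl
  | cons c rest ih =>
    have hc : c ≠ '.' := fun hh => h (hh ▸ List.mem_cons_self)
    have hr : '.' ∉ rest := fun hh => h (List.mem_cons_of_mem _ hh)
    rw [tokRun_cons]
    cases hts : tokStep (m, ds, l) c with
    | none =>
      simp only [List.foldl_cons, Option.bind_some, B_step_nondot c hc, hts, Option.map_none]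
      exact foldB_none rest
    | some st' =>
      obtain ⟨m', ds', l'⟩ := st'
      simp only [List.foldl_cons, Option.bind_some, B_step_nondot c hc, hts, Option.map_some]
      exact ih hr m' ds' l'

theorem tok_tail (cs : List Char) (ds : List Char) (l : Int) :
    tokRun cs (.tail, ds, l) = some (.tail, ds, l) := by
  induction cs with
  | nil => rfl
  | cons c rest ih => rw [tokRun_cons]; exact ih

theorem tok_digits (cs : List Char) (ds : List Char) (l : Int) :
    tokRun cs (.digits, ds, l) =
      match cs.dropWhile PySem.Chars.isdigit with
      | [] => some (.digits, ds ++ cs.takeWhile PySem.Chars.isdigit, l)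
      | c :: _ => some (.tail, ds ++ cs.takeWhile PySem.Chars.isdigit, B_lmap.getD c (-1)) := by
  induction cs generalizing ds with
  | nil => simp [tokRun]
  | cons c rest ih =>
    rw [tokRun_cons]
    by_cases hd : PySem.Chars.isdigit c
    · simp [tokStep, hd, ih (ds ++ [c])]
    · simp [tokStep, hd, tok_tail]

theorem A_scan_eq (s dp : List Char) :
    A_scan s dp = (dp ++ s.takeWhile PySem.Chars.isdigit,
                   (s.dropWhile PySem.Chars.isdigit).take 1) := by
  induction s generalizing dp with
  | nil => simp [A_scan]
  | cons c rest ih =>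
    by_cases h : PySem.Chars.isdigit c <;> simp [A_scan, h, ih]

-- the two dict literals agree: single-char-string keys vs char keys
theorem lookup_single (c : Char) : A_lmap.get? [c] = B_lmap.get? c := by
  by_cases h : c ∈ ['S','P','D','F','G','H','I','J','K','L']
  · fin_cases h <;> decide
  · have h' : ¬(c = 'S') ∧ ¬(c = 'P') ∧ ¬(c = 'D') ∧ ¬(c = 'F') ∧ ¬(c = 'G') ∧ ¬(c = 'H') ∧ ¬(c = 'I') ∧ ¬(c = 'J') ∧ ¬(c = 'K') ∧ ¬(c = 'L') := by
      simpa using h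
    obtain ⟨h1, h2, h3, h4, h5, h6, h7, h8, h9, h10⟩ := h'
    simp [A_lmap, B_lmap, PySem.Dict.get?, List.find?,
      beq_eq_false_iff_ne.mpr (Ne.symm h1), beq_eq_false_iff_ne.mpr (Ne.symm h2),
      beq_eq_false_iff_ne.mpr (Ne.symm h3), beq_eq_false_iff_ne.mpr (Ne.symm h4),
      beq_eq_false_iff_ne.mpr (Ne.symm h5), beq_eq_false_iff_ne.mpr (Ne.symm h6),
      beq_eq_false_iff_ne.mpr (Ne.symm h7), beq_eq_false_iff_ne.mpr (Ne.symm h8),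
      beq_eq_false_iff_ne.mpr (Ne.symm h9), beq_eq_false_iff_ne.mpr (Ne.symm h10)]

theorem lookup_nonsingle (r : List Char) (h : r.length ≠ 1) : A_lmap.get? r = none := by
  match r with
  | [] => rfl
  | [c] => exact absurd rfl h
  | c :: c' :: t => simp [A_lmap, PySem.Dict.get?, List.find?]

theorem lookup_nonneg (c : Char) (v : Int) (h : B_lmap.get? c = some v) : 0 ≤ v := by
  simp only [PySem.Dict.get?, Option.map_eq_some_iff] at h
  obtain ⟨p, hp, rfl⟩ := h
  have hm := List.mem_of_find?_eq_some hp
  fin_cases hm <;> norm_num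

theorem getD_lookup (c : Char) : B_lmap.getD c (-1) = (B_lmap.get? c).getD (-1) := rfl

-- the '.'-iteration from a pairless state is the initial-style finalization
theorem B_step_dot_empty (m : BMode) (ds : List Char) (l : Int) :
    B_step (m, ds, l, []) '.' = (iniSt (m, ds, l)).map (fun p => (.bg, [], -1, [p])) := by
  cases m <;> simp [B_step, iniSt]

theorem B_step_dot_one (m : BMode) (ds : List Char) (l : Int) (p : Int × Int) :
    B_step (m, ds, l, [p]) '.' = none := by
  cases m <;> simp [B_step]

-- the colon-mode tail of a token run, shared by the two finalization lemmas
theorem tok_colon (rest : List Char) (ds : List Char) :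
    tokRun rest (.colon, ds, -1) =
      match rest with
      | [] => some (.colon, ds, -1)
      | c :: rest2 =>
        match B_lmap.get? c with
        | none => none
        | some lv => if rest2 = [] then some (.colonletter, ds, lv) else none := by
  cases rest with
  | nil => rfl
  | cons c rest2 =>
    rw [tokRun_cons]
    cases hg : B_lmap.get? c with
    | none => simp [tokStep, hg]
    | some lv =>
      cases rest2 with
      | nil => simp [tokStep, hg, tokRun]
      | cons c3 r3 =>
        simp only [tokStep, hg]
        rw [tokRun_cons]
        simp [tokStep]

-- initial-style finalization of a token run = A's initial-state parser
theorem finI_eq (cs : List Char) (h : '.' ∉ cs) :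
    (tokRun cs (.bg, [], -1)).bind iniSt = A_parseInitial cs := by
  cases cs with
  | nil => simp [tokRun, iniSt, A_parseInitial, A_scan, PySem.Chars.startswith, List.isPrefixOf]
  | cons c rest =>
    by_cases hcol : c = ':'
    · subst hcol
      rw [tokRun_cons]
      simp only [tokStep, if_true]
      rw [tok_colon]
      have hsw : PySem.Chars.startswith (':' :: rest) [':'] = true := by
        simp [PySem.Chars.startswith, List.isPrefixOf]
      cases rest with
      | nil =>
        simp [A_parseInitial, hsw, iniSt, lookup_nonsingle ([] : List Char) (by simp)]
      | cons c2 rest2 =>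
        cases hg : B_lmap.get? c2 with
        | none =>
          cases rest2 with
          | nil => simp [A_parseInitial, hsw, hg, lookup_single, iniSt]
          | cons c3 r3 =>
            simp [A_parseInitial, hsw, hg, iniSt,
              lookup_nonsingle (c2 :: c3 :: r3) (by simp)]
        | some lv =>
          cases rest2 with
          | nil => simp [A_parseInitial, hsw, hg, lookup_single, iniSt]
          | cons c3 r3 =>
            simp [A_parseInitial, hsw, hg, iniSt,
              lookup_nonsingle (c2 :: c3 :: r3) (by simp)]
    · have hsw : PySem.Chars.startswith (c :: rest) [':'] = false := by
        simp [PySem.Chars.startswith, List.isPrefixOf, Ne.symm hcol]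
      rw [tokRun_cons]
      by_cases hd : PySem.Chars.isdigit c
      · simp only [tokStep, if_neg hcol, if_pos hd]
        rw [tok_digits]
        cases hdw : rest.dropWhile PySem.Chars.isdigit with
        | nil =>
          simp [A_parseInitial, hsw, A_scan_eq, iniSt, hd, hdw,
            lookup_nonsingle ([] : List Char) (by simp)]
        | cons c2 r2 =>
          cases hg : B_lmap.get? c2 with
          | none =>
            simp [A_parseInitial, hsw, A_scan_eq, iniSt, hd, hdw, getD_lookup, hg, lookup_single]
          | some lv =>
            have hnn := lookup_nonneg c2 lv hg
            simp [A_parseInitial, hsw, A_scan_eq, iniSt, hd, hdw, getD_lookup, hg, lookup_single, hnn]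
      · simp [tokStep, hcol, hd, A_parseInitial, hsw, A_scan_eq]

-- final-style finalization of a token run = A's final-state parser
theorem finF_eq (cs : List Char) (h : '.' ∉ cs) :
    (tokRun cs (.bg, [], -1)).bind finSt = A_parseFinal cs := by
  cases cs with
  | nil => simp [tokRun, finSt, A_parseFinal, A_scan, PySem.Chars.startswith, List.isPrefixOf]
  | cons c rest =>
    by_cases hcol : c = ':'
    · subst hcol
      rw [tokRun_cons]
      simp only [tokStep, if_true]
      rw [tok_colon]
      have hsw : PySem.Chars.startswith (':' :: rest) [':'] = true := by
        simp [PySem.Chars.startswith, List.isPrefixOf]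
      cases rest with
      | nil =>
        simp [A_parseFinal, hsw, finSt, lookup_nonsingle ([] : List Char) (by simp)]
      | cons c2 rest2 =>
        cases hg : B_lmap.get? c2 with
        | none =>
          cases rest2 with
          | nil => simp [A_parseFinal, hsw, hg, lookup_single, finSt]
          | cons c3 r3 =>
            simp [A_parseFinal, hsw, hg, finSt,
              lookup_nonsingle (c2 :: c3 :: r3) (by simp)]
        | some lv =>
          cases rest2 with
          | nil => simp [A_parseFinal, hsw, hg, lookup_single, finSt]
          | cons c3 r3 =>
            simp [A_parseFinal, hsw, hg, finSt,
              lookup_nonsingle (c2 :: c3 :: r3) (by simp)]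
    · have hsw : PySem.Chars.startswith (c :: rest) [':'] = false := by
        simp [PySem.Chars.startswith, List.isPrefixOf, Ne.symm hcol]
      rw [tokRun_cons]
      by_cases hd : PySem.Chars.isdigit c
      · simp only [tokStep, if_neg hcol, if_pos hd]
        rw [tok_digits]
        cases hdw : rest.dropWhile PySem.Chars.isdigit with
        | nil =>
          simp [A_parseFinal, hsw, A_scan_eq, finSt, hd, hdw,
            lookup_nonsingle ([] : List Char) (by simp)]
        | cons c2 r2 =>
          cases hg : B_lmap.get? c2 with
          | none =>
            simp [A_parseFinal, hsw, A_scan_eq, finSt, hd, hdw, getD_lookup, hg, lookup_single]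
          | some lv =>
            simp [A_parseFinal, hsw, A_scan_eq, finSt, hd, hdw, getD_lookup, hg, lookup_single]
      · simp [tokStep, hcol, hd, A_parseFinal, hsw, A_scan_eq]

-- split-on-dot, recursively
def mySplit : List Char → List Char → List (List Char)
  | [], cur => [cur.reverse]
  | c :: rest, cur => if c = '.' then cur.reverse :: mySplit rest [] else mySplit rest (c :: cur)

theorem go_eq (fuel : Nat) (l cur : List Char) (acc : List (List Char)) (h : l.length < fuel) :
    PySem.Chars.splitOn.go ['.'] fuel l cur acc = acc.reverse ++ mySplit l cur := by
  induction fuel generalizing l cur acc with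
  | zero => omega
  | succ f ih =>
    cases l with
    | nil => simp [PySem.Chars.splitOn.go, mySplit]
    | cons c rest =>
      have hr : rest.length < f := by simpa using h
      by_cases hc : c = '.'
      · subst hc
        rw [PySem.Chars.splitOn.go]
        simp only [List.isPrefixOf, beq_self_eq_true, Bool.true_and]
        simp [ih _ _ _ hr, mySplit]
      · rw [PySem.Chars.splitOn.go]
        simp only [List.isPrefixOf]
        simp [beq_eq_false_iff_ne.mpr (Ne.symm hc), ih _ _ _ hr, mySplit, hc]

theorem splitOn_dot (cs : List Char) : PySem.Chars.splitOn cs ['.'] = mySplit cs [] := by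
  simpa using go_eq (cs.length + 1) cs [] [] (by omega)

theorem mySplit_nodot (l : List Char) (h : '.' ∉ l) (cur : List Char) :
    mySplit l cur = [cur.reverse ++ l] := by
  induction l generalizing cur with
  | nil => simp [mySplit]
  | cons c rest ih =>
    have hc : c ≠ '.' := fun hh => h (hh ▸ List.mem_cons_self)
    have hr : '.' ∉ rest := fun hh => h (List.mem_cons_of_mem _ hh)
    simp [mySplit, hc, ih hr]

theorem mySplit_dot (t : List Char) (h : '.' ∉ t) (r cur : List Char) :
    mySplit (t ++ '.' :: r) cur = (cur.reverse ++ t) :: mySplit r [] := by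
  induction t generalizing cur with
  | nil => simp [mySplit]
  | cons c rest ih =>
    have hc : c ≠ '.' := fun hh => h (hh ▸ List.mem_cons_self)
    have hr : '.' ∉ rest := fun hh => h (List.mem_cons_of_mem _ hh)
    simp [mySplit, hc, ih hr]

theorem mySplit_ne_nil (l cur : List Char) : mySplit l cur ≠ [] := by
  induction l generalizing cur with
  | nil => simp [mySplit]
  | cons c rest ih => by_cases hc : c = '.' <;> simp [mySplit, hc, ih]

theorem mySplit_two_le (l : List Char) (h : '.' ∈ l) (cur : List Char) :
    2 ≤ (mySplit l cur).length := by
  induction l generalizing cur with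
  | nil => simp at h
  | cons c rest ih =>
    by_cases hc : c = '.'
    · subst hc
      simp [mySplit]
      cases hr : mySplit rest [] with
      | nil => exact absurd hr (mySplit_ne_nil rest [])
      | cons x xs => simp
    · rcases List.mem_cons.mp h with h1 | h1
      · exact absurd h1.symm hc
      · simpa [mySplit, hc] using ih h1 (c :: cur)

theorem parts_eq (filename : String) :
    (PySem.Str.split? filename ".").getD [] = (mySplit filename.toList []).map String.ofList := by
  rw [PySem.Str.split?]
  rw [show (".".toList) = ['.'] from by decide]
  simp [PySem.Chars.split?, splitOn_dot]


theorem exists_dot_split (l : List Char) (h : '.' ∈ l) :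
    ∃ t r, l = t ++ '.' :: r ∧ '.' ∉ t := by
  induction l with
  | nil => simp at h
  | cons c rest ih =>
    by_cases hc : c = '.'
    · exact ⟨[], rest, by simp [hc], by simp⟩
    · rcases List.mem_cons.mp h with h1 | h1
      · exact absurd h1.symm hc
      · obtain ⟨t, r, hre, hni⟩ := ih h1
        exact ⟨c :: t, r, by simp [hre], by simp [Ne.symm hc, hni]⟩

-- ===== VERDICT (by name: the statement is the Claim_ definition above) =====
theorem decode_filename_spec : Claim_equal_decode_filename := by
  intro filename _
  unfold Spec_decode_filename
  simp only [decode_filename, decode_filename_alt]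
  rw [parts_eq]
  by_cases hdot : '.' ∈ filename.toList
  · obtain ⟨t, r, hts, hnd⟩ := exists_dot_split _ hdot
    rw [hts, mySplit_dot t hnd r [], List.foldl_append]
    rw [foldB_nodot t hnd]
    cases hti : tokRun t (.bg, [], -1) with
    | none =>
      -- B fails; A's initial parse fails (or there are ≥ 3 parts)
      simp only [Option.map_none, List.foldl_cons, Option.bind_none]
      rw [foldB_none]
      by_cases hdr : '.' ∈ r
      · obtain ⟨x, xs, hx⟩ := List.exists_cons_of_ne_nil (mySplit_ne_nil r [])
        have h2 := mySplit_two_le r hdr []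
        rw [hx] at h2 ⊢
        cases xs with
        | nil => simp at h2
        | cons y ys =>
          have hAi : A_parseInitial t = none := by rw [← finI_eq t hnd, hti]; rfl
          simp [B_FAIL]
      · rw [mySplit_nodot r hdr]
        have hAi : A_parseInitial t = none := by rw [← finI_eq t hnd, hti]; rfl
        simp [hAi, B_FAIL]
    | some st =>
      obtain ⟨m, ds, l⟩ := st
      simp only [Option.map_some, List.foldl_cons, Option.bind_some]
      rw [B_step_dot_empty]
      cases hini : iniSt (m, ds, l) with
      | none =>
        have hAi : A_parseInitial t = none := by rw [← finI_eq t hnd, hti]; simpa using hini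
        rw [Option.map_none, foldB_none]
        by_cases hdr : '.' ∈ r
        · obtain ⟨x, xs, hx⟩ := List.exists_cons_of_ne_nil (mySplit_ne_nil r [])
          have h2 := mySplit_two_le r hdr []
          rw [hx] at h2 ⊢
          cases xs with
          | nil => simp at h2
          | cons y ys => simp [B_FAIL]
        · rw [mySplit_nodot r hdr]
          simp [hAi, B_FAIL]
      | some p1 =>
        obtain ⟨n1, l1⟩ := p1
        have hAi : A_parseInitial t = some (n1, l1) := by
          rw [← finI_eq t hnd, hti]; simpa using hini
        rw [Option.map_some]
        by_cases hdr : '.' ∈ r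
        · -- three or more parts: both fail
          obtain ⟨t2, r2, hr2, hnd2⟩ := exists_dot_split r hdr
          rw [hr2, List.foldl_append, foldB_nodot t2 hnd2, mySplit_dot t2 hnd2]
          obtain ⟨x, xs, hx⟩ := List.exists_cons_of_ne_nil (mySplit_ne_nil r2 [])
          rw [hx]
          cases hti2 : tokRun t2 (.bg, [], -1) with
          | none => rw [Option.map_none, foldB_none]; simp [B_FAIL]
          | some st2 =>
            obtain ⟨m2, ds2, l2⟩ := st2
            simp only [Option.map_some, List.foldl_cons, Option.bind_some]
            rw [B_step_dot_one, foldB_none]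
            simp [B_FAIL]
        · -- exactly two parts: compare the final parses
          rw [mySplit_nodot r hdr, foldB_nodot r hdr]
          cases htr2 : tokRun r (.bg, [], -1) with
          | none =>
            have hAf : A_parseFinal r = none := by rw [← finF_eq r hdr, htr2]; rfl
            simp [hAi, hAf, B_FAIL]
          | some st2 =>
            obtain ⟨m2, ds2, l2⟩ := st2
            have hAf : A_parseFinal r = (finSt (m2, ds2, l2)) := by
              rw [← finF_eq r hdr, htr2]; rfl
            cases m2 <;> simp [hAi, hAf, finSt, B_FAIL]
  · rw [mySplit_nodot _ hdot, foldB_nodot _ hdot]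
    cases htr : tokRun filename.toList (.bg, [], -1) with
    | none => simp [B_FAIL]
    | some st => obtain ⟨m, ds, l⟩ := st; cases m <;> simp [B_FAIL]
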